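-- pv_equiv track=rewrite | github.com/eriklysoe/biotools | app/primercheck/utils_structure.py | generate_dimer_ascii
-- ===== SOURCE A (Python) =====
-- def generate_dimer_ascii(seq1, seq2, is_homodimer=False):
--     """
--     Generate an ASCII representation of dimer alignment.
--     Finds the best alignment and shows base pairing.
--     """
--     complement = {"A": "T", "T": "A", "G": "C", "C": "G"}
--     seq2_rc = seq2[::-1]
--
--     best_score = 0
--     best_offset = 0
--
--     # Try all offsets
--     for offset in range(-(len(seq2_rc) - 1), len(seq1)):
--         score = 0
--         for i in range(len(seq1)):
--             j = i - offset
--             if 0 <= j < len(seq2_rc):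
--                 if seq1[i] == complement.get(seq2_rc[j], ""):
--                     score += 1
--         if score > best_score:
--             best_score = score
--             best_offset = offset
--
--     if best_score == 0:
--         return {"top": seq1, "middle": " " * len(seq1), "bottom": seq2_rc}
--
--     # Build alignment at best offset
--     top_line = ""
--     mid_line = ""
--     bot_line = ""
--
--     start = min(0, best_offset)
--     end = max(len(seq1), best_offset + len(seq2_rc))
--
--     for pos in range(start, end):
--         i = pos  # position in seq1
--         j = pos - best_offset  # position in seq2_rc
--
--         c1 = seq1[i] if 0 <= i < len(seq1) else " "
--         c2 = seq2_rc[j] if 0 <= j < len(seq2_rc) else " "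
--
--         top_line += c1
--         bot_line += c2
--
--         if c1 != " " and c2 != " " and c1 == complement.get(c2, ""):
--             mid_line += "|"
--         elif c1 != " " and c2 != " ":
--             mid_line += "\u00b7"
--         else:
--             mid_line += " "
--
--     label_top = "5'" if not is_homodimer else "5'"
--     label_bot = "3'" if not is_homodimer else "3'"
--
--     return {
--         "top": f"{label_top} {top_line} 3'",
--         "middle": f"   {mid_line}",
--         "bottom": f"3' {bot_line} 5'",
--     }
-- ===== SOURCE B (Python) =====
-- def generate_dimer_ascii(seq1, seq2, is_homodimer=False):
--     """
--     Generate an ASCII representation of dimer alignment.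
--     Single-pass pair histogram over complementary (i, j) pairs instead of
--     scanning every offset; then render via join.
--     """
--     complement = {"A": "T", "T": "A", "G": "C", "C": "G"}
--     seq2_rc = seq2[::-1]
--
--     # For each base b, the positions j in seq2_rc whose base pairs with b.
--     partners = {}
--     for j, c2 in enumerate(seq2_rc):
--         c1 = complement.get(c2)
--         if c1 is not None:
--             partners.setdefault(c1, []).append(j)
--
--     # Each complementary pair (i, j) contributes one match at offset i - j.
--     counter = {}
--     for i, c1 in enumerate(seq1):
--         for j in partners.get(c1, []):
--             counter[i - j] = counter.get(i - j, 0) + 1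
--
--     if not counter:
--         return {"top": seq1, "middle": " " * len(seq1), "bottom": seq2_rc}
--
--     best_score = max(counter.values())
--     best_offset = min(k for k, v in counter.items() if v == best_score)
--
--     start = min(0, best_offset)
--     end = max(len(seq1), best_offset + len(seq2_rc))
--
--     def cell(pos):
--         c1 = seq1[pos] if 0 <= pos < len(seq1) else " "
--         j = pos - best_offset
--         c2 = seq2_rc[j] if 0 <= j < len(seq2_rc) else " "
--         if c1 != " " and c2 != " ":
--             m = "|" if complement.get(c2) == c1 else "\u00b7"
--         else:
--             m = " "
--         return c1, m, c2
--
--     cells = [cell(p) for p in range(start, end)]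
--     return {
--         "top": "5' " + "".join(c for c, _, _ in cells) + " 3'",
--         "middle": "   " + "".join(m for _, m, _ in cells),
--         "bottom": "3' " + "".join(c for _, _, c in cells) + " 5'",
--     }
-- ===== Notes on version B (the rewrite author's own statement) =====
-- stated objective: faster
-- what changed: A scores every offset with a full inner scan over seq1 (O((n+m)*n)); B makes one pass over the complementary (i,j) base pairs, accumulating a histogram keyed by offset i-j, then takes the max count with smallest-offset tie-break and renders the winning alignment via join, so the per-offset rescanning disappears.
import Mathlib
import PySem

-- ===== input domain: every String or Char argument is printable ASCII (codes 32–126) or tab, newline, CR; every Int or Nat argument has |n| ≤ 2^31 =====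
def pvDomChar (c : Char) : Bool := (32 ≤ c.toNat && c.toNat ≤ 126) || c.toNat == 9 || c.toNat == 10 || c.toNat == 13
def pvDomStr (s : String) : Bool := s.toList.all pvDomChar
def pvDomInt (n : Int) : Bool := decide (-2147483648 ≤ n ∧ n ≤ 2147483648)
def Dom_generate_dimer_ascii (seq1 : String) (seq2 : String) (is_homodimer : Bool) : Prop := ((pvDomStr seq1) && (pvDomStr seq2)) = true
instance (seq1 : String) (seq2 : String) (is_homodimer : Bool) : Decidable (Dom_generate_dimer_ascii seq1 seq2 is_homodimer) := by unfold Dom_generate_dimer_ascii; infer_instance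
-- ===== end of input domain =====

-- B replaces A's scan of every offset (recomputing a full overlap score per offset) by a single
-- histogram pass over the complementary (i, j) pairs, keyed by offset i - j; same return value.

-- ===== PORT A =====

-- the complement dict (Python's length-1 string keys/values are ported as Char)
def pvComp : PySem.Dict Char Char := PySem.Dict.ofList [('A','T'),('T','A'),('G','C'),('C','G')]

-- seq2[::-1]
def pvRC (s : String) : List Char := (PySem.List.slice? s.toList none none (-1)).getD []

-- inner loop: score of one offset.  'seq1[i] == complement.get(seq2_rc[j], "")' is ported as
-- 'pvComp.get? c2 = some c1' (the "" default can never equal a single character).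
def pvScoreA (l1 l2r : List Char) (off : Int) : Int :=
  (PySem.List.pyRange 0 (PySem.List.len l1) 1).foldl
    (fun score i =>
      let j := i - off
      if 0 ≤ j ∧ j < PySem.List.len l2r then
        (if pvComp.get? (PySem.List.pyGetD l2r j ' ') = some (PySem.List.pyGetD l1 i ' ')
         then score + 1 else score)
      else score) 0

-- outer loop: best (score, offset), strict improvement, initial (0, 0)
def pvBestA (l1 l2r : List Char) : Int × Int :=
  (PySem.List.pyRange (-(PySem.List.len l2r - 1)) (PySem.List.len l1) 1).foldl
    (fun b off =>
      let sc := pvScoreA l1 l2r off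
      if sc > b.1 then (sc, off) else b) (0, 0)

-- rendering loop: three growing strings (as char lists), one position at a time
def pvRenderA (l1 l2r : List Char) (bo : Int) : List Char × List Char × List Char :=
  (PySem.List.pyRange (min 0 bo) (max (PySem.List.len l1) (bo + PySem.List.len l2r)) 1).foldl
    (fun acc pos =>
      let j := pos - bo
      let c1 := if 0 ≤ pos ∧ pos < PySem.List.len l1 then PySem.List.pyGetD l1 pos ' ' else ' '
      let c2 := if 0 ≤ j ∧ j < PySem.List.len l2r then PySem.List.pyGetD l2r j ' ' else ' '
      let mc := if c1 ≠ ' ' ∧ c2 ≠ ' ' ∧ pvComp.get? c2 = some c1 then '|'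
                else if c1 ≠ ' ' ∧ c2 ≠ ' ' then '·' else ' '
      (acc.1 ++ [c1], acc.2.1 ++ [mc], acc.2.2 ++ [c2]))
    ([], [], [])

def generate_dimer_ascii (seq1 : String) (seq2 : String) (is_homodimer : Bool) : List (String × String) :=
  let l1 := seq1.toList
  let l2r := pvRC seq2
  let best := pvBestA l1 l2r
  if best.1 = 0 then
    [("top", seq1),
     ("middle", String.ofList (PySem.List.pyRepeat [' '] (PySem.List.len l1))),
     ("bottom", String.ofList l2r)]
  else
    let lines := pvRenderA l1 l2r best.2
    let labelTop := if is_homodimer = false then "5'" else "5'"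
    let labelBot := if is_homodimer = false then "3'" else "3'"
    [("top", String.ofList (labelTop.toList ++ ' ' :: lines.1 ++ " 3'".toList)),
     ("middle", String.ofList ("   ".toList ++ lines.2.1)),
     ("bottom", String.ofList (labelBot.toList ++ ' ' :: lines.2.2 ++ " 5'".toList))]

-- ===== PORT B =====

-- partners[b] = positions j in seq2_rc whose base pairs with b (built with setdefault/append)
def pvPartners (l2r : List Char) : PySem.Dict Char (List Int) :=
  (PySem.List.enumerate l2r).foldl
    (fun d p =>
      match pvComp.get? p.2 with
      | some c1 => d.modify c1 [] (· ++ [p.1])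
      | none => d)
    PySem.Dict.empty

-- counter[i - j] += 1 for every complementary pair (i, j)
def pvCounter (l1 l2r : List Char) : PySem.Dict Int Int :=
  let ps := pvPartners l2r
  (PySem.List.enumerate l1).foldl
    (fun d p =>
      (ps.getD p.2 []).foldl
        (fun d j => d.insert (p.1 - j) (d.getD (p.1 - j) 0 + 1)) d)
    PySem.Dict.empty

-- one rendered column (top char, middle char, bottom char)
def pvCell (l1 l2r : List Char) (bo : Int) (pos : Int) : Char × Char × Char :=
  let c1 := if 0 ≤ pos ∧ pos < PySem.List.len l1 then PySem.List.pyGetD l1 pos ' ' else ' '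
  let j := pos - bo
  let c2 := if 0 ≤ j ∧ j < PySem.List.len l2r then PySem.List.pyGetD l2r j ' ' else ' '
  let mc := if c1 ≠ ' ' ∧ c2 ≠ ' ' then (if pvComp.get? c2 = some c1 then '|' else '·') else ' '
  (c1, mc, c2)

def generate_dimer_ascii_alt (seq1 : String) (seq2 : String) (is_homodimer : Bool) : List (String × String) :=
  let l1 := seq1.toList
  let l2r := pvRC seq2
  let counter := pvCounter l1 l2r
  if counter.items = [] then
    [("top", seq1),
     ("middle", String.ofList (PySem.List.pyRepeat [' '] (PySem.List.len l1))),
     ("bottom", String.ofList l2r)]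
  else
    -- max(counter.values()); the list is nonempty here, so the .getD default is unreachable
    let bestScore := PySem.List.maxD counter.values (fun v => v) 0
    -- min(k for k, v in counter.items() if v == best_score); nonempty for the same reason
    let bestOffset :=
      PySem.List.minD ((counter.items.filter (fun p => p.2 == bestScore)).map (·.1)) (fun k => k) 0
    let cells := (PySem.List.pyRange (min 0 bestOffset)
        (max (PySem.List.len l1) (bestOffset + PySem.List.len l2r)) 1).map (pvCell l1 l2r bestOffset)
    [("top", String.ofList ("5' ".toList ++ cells.map (·.1) ++ " 3'".toList)),
     ("middle", String.ofList ("   ".toList ++ cells.map (fun c => c.2.1))),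
     ("bottom", String.ofList ("3' ".toList ++ cells.map (fun c => c.2.2) ++ " 5'".toList))]

-- ===== PRECONDITION & SPEC =====
def Spec_generate_dimer_ascii (seq1 : String) (seq2 : String) (is_homodimer : Bool) (out : List (String × String)) : Prop := out = generate_dimer_ascii_alt seq1 seq2 is_homodimer
instance (seq1 : String) (seq2 : String) (is_homodimer : Bool) (out : List (String × String)) : Decidable (Spec_generate_dimer_ascii seq1 seq2 is_homodimer out) := by unfold Spec_generate_dimer_ascii; infer_instance

-- ===== CLAIM (what is proved, stated in full; the proofs are below) =====
def Claim_equal_generate_dimer_ascii : Prop := ∀ (seq1 : String) (seq2 : String) (is_homodimer : Bool), Dom_generate_dimer_ascii seq1 seq2 is_homodimer → Spec_generate_dimer_ascii seq1 seq2 is_homodimer (generate_dimer_ascii seq1 seq2 is_homodimer)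

-- ===== LEMMAS AND PROOFS =====

-- the per-position match predicate both scores count (abbrev so decidability is inferred)
abbrev pvP (l1 l2r : List Char) (off : Int) (i : Int) : Prop :=
  0 ≤ i - off ∧ i - off < PySem.List.len l2r ∧
    pvComp.get? (PySem.List.pyGetD l2r (i - off) ' ') = some (PySem.List.pyGetD l1 i ' ')

theorem pvScoreA_eq_countP (l1 l2r : List Char) (off : Int) :
    pvScoreA l1 l2r off =
      ((PySem.List.pyRange 0 (PySem.List.len l1) 1).countP
        (fun i => decide (pvP l1 l2r off i)) : Int) := by
  unfold pvScoreA
  rw [show (fun (score : Int) (i : Int) =>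
        let j := i - off
        if 0 ≤ j ∧ j < PySem.List.len l2r then
          (if pvComp.get? (PySem.List.pyGetD l2r j ' ') = some (PySem.List.pyGetD l1 i ' ')
           then score + 1 else score)
        else score)
      = (fun (score : Int) (i : Int) => if pvP l1 l2r off i then score + 1 else score) from
    funext fun score => funext fun i => by
      simp only [pvP]; split_ifs <;> tauto]
  rw [PySem.List.foldl_ite_add_one]
  simp

theorem pvScoreA_support (l1 l2r : List Char) (off : Int) (h : 0 < pvScoreA l1 l2r off) :
    -(PySem.List.len l2r - 1) ≤ off ∧ off < PySem.List.len l1 := by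
  rw [pvScoreA_eq_countP] at h
  have h' : 0 < (PySem.List.pyRange 0 (PySem.List.len l1) 1).countP
      (fun i => decide (pvP l1 l2r off i)) := by exact_mod_cast h
  obtain ⟨i, hiL, hp⟩ := List.countP_pos_iff.mp h'
  have hi := PySem.List.mem_pyRange_one.mp hiL
  have hp' : pvP l1 l2r off i := of_decide_eq_true hp
  obtain ⟨h1, h2, _⟩ := hp'
  omega

theorem pvPartners_aux (l : List (Int × Char)) (d : PySem.Dict Char (List Int)) (c : Char) :
    (l.foldl (fun d p =>
        match pvComp.get? p.2 with
        | some c1 => d.modify c1 [] (· ++ [p.1])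
        | none => d) d).getD c [] =
      d.getD c [] ++ (l.filter (fun p => pvComp.get? p.2 == some c)).map (·.1) := by
  induction l generalizing d with
  | nil => simp
  | cons p l ih =>
    simp only [List.foldl_cons]
    cases hc : pvComp.get? p.2 with
    | none =>
      rw [ih]; simp [List.filter_cons, hc]
    | some c1 =>
      rw [ih]
      have hred : (match some c1 with
          | some c1 => d.modify c1 [] (· ++ [p.1])
          | none => d) = d.modify c1 [] (· ++ [p.1]) := rfl
      rw [hred]
      by_cases hcc : c = c1
      · subst hcc
        rw [PySem.Dict.getD_modify_self]
        simp [List.filter_cons, hc]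
      · rw [PySem.Dict.getD_modify_of_ne _ _ _ hcc]
        have : (pvComp.get? p.2 == some c) = false := by
          rw [hc]; simp; exact fun h => hcc h.symm
        simp [List.filter_cons, this]

theorem pvPartners_getD (l2r : List Char) (c : Char) :
    (pvPartners l2r).getD c [] =
      ((PySem.List.enumerate l2r).filter (fun p => pvComp.get? p.2 == some c)).map (·.1) := by
  unfold pvPartners
  rw [pvPartners_aux]
  simp

theorem pvPartners_count (l2r : List Char) (c : Char) (j : Int) :
    List.count j ((pvPartners l2r).getD c []) =
      (if 0 ≤ j ∧ j < PySem.List.len l2r ∧ pvComp.get? (PySem.List.pyGetD l2r j ' ') = some c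
       then 1 else 0) := by
  rw [pvPartners_getD, PySem.List.enumerate_eq_map_pyRange l2r ' ', List.filter_map, List.map_map]
  have hmapid : ((fun (p : Int × Char) => p.1) ∘ fun j => (j, PySem.List.pyGetD l2r j ' '))
      = fun (k : Int) => k := rfl
  rw [hmapid, List.map_id']
  set L := (PySem.List.pyRange 0 (PySem.List.len l2r) 1).filter
      ((fun p => pvComp.get? p.2 == some c) ∘ fun j => (j, PySem.List.pyGetD l2r j ' ')) with hL
  have hnd : L.Nodup := (PySem.List.nodup_pyRange_one _ _).filter _
  by_cases hj : j ∈ L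
  · have hmem := List.mem_filter.mp hj
    have hb := PySem.List.mem_pyRange_one.mp hmem.1
    have heq : pvComp.get? (PySem.List.pyGetD l2r j ' ') = some c := by
      have := hmem.2
      simpa using this
    rw [if_pos ⟨hb.1, hb.2, heq⟩]
    have h1 := List.nodup_iff_count_le_one.mp hnd j
    have h2 := List.count_pos_iff.mpr hj
    omega
  · rw [List.count_eq_zero.mpr hj, if_neg]
    intro ⟨h1, h2, h3⟩
    exact hj (List.mem_filter.mpr ⟨PySem.List.mem_pyRange_one.mpr ⟨h1, h2⟩, by simpa using h3⟩)

theorem pvCounter_aux (ps : PySem.Dict Char (List Int)) (l : List (Int × Char))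
    (d : PySem.Dict Int Int) (off : Int) :
    (l.foldl (fun d p =>
        (ps.getD p.2 []).foldl
          (fun d j => d.insert (p.1 - j) (d.getD (p.1 - j) 0 + 1)) d) d).getD off 0 =
      d.getD off 0 +
        (l.map (fun p =>
          (List.count off ((ps.getD p.2 []).map (fun j => p.1 - j)) : Int))).sum := by
  induction l generalizing d with
  | nil => simp
  | cons p l ih =>
    simp only [List.foldl_cons, List.map_cons, List.sum_cons]
    rw [ih]
    have hinner : ((ps.getD p.2 []).foldl
        (fun d j => d.insert (p.1 - j) (d.getD (p.1 - j) 0 + 1)) d).getD off 0 =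
        d.getD off 0 + (List.count off ((ps.getD p.2 []).map (fun j => p.1 - j)) : Int) := by
      rw [show ((ps.getD p.2 []).foldl
          (fun d j => d.insert (p.1 - j) (d.getD (p.1 - j) 0 + 1)) d) =
          (((ps.getD p.2 []).map (fun j => p.1 - j)).foldl
            (fun d k => d.insert k (d.getD k 0 + 1)) d) from (List.foldl_map (f := fun j : Int => p.1 - j) (g := fun (d : PySem.Dict Int Int) k => d.insert k (d.getD k 0 + 1))).symm]
      exact PySem.Dict.getD_foldl_insert_add_one _ _ _
    rw [hinner]; ring

theorem pvCounter_getD (l1 l2r : List Char) (off : Int) :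
    (pvCounter l1 l2r).getD off 0 = pvScoreA l1 l2r off := by
  unfold pvCounter
  rw [pvCounter_aux]
  rw [PySem.Dict.getD_empty, pvScoreA_eq_countP]
  rw [PySem.List.enumerate_eq_map_pyRange l1 ' ', List.map_map]
  rw [List.map_congr_left (l := PySem.List.pyRange 0 (PySem.List.len l1) 1)
    (f := ((fun p : Int × Char =>
        (List.count off (((pvPartners l2r).getD p.2 []).map (fun j => p.1 - j)) : Int)) ∘
        fun j => (j, PySem.List.pyGetD l1 j ' ')))
    (g := fun i => if pvP l1 l2r off i then (1 : Int) else 0)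
    (fun i _ => by
      simp only [Function.comp]
      rw [show (fun j => i - j) = (fun j : Int => i - j) from rfl]
      have hinj : Function.Injective (fun j : Int => i - j) := by
        intro a b h; simpa using h
      have hc := List.count_map_of_injective ((pvPartners l2r).getD (PySem.List.pyGetD l1 i ' ') [])
        (fun j : Int => i - j) hinj (i - off)
      have hc' : List.count off
          (((pvPartners l2r).getD (PySem.List.pyGetD l1 i ' ') []).map (fun j : Int => i - j)) =
          List.count (i - off) ((pvPartners l2r).getD (PySem.List.pyGetD l1 i ' ') []) := by
        simpa using hc
      rw [hc', pvPartners_count]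
      by_cases hP : 0 ≤ i - off ∧ i - off < PySem.List.len l2r ∧
          pvComp.get? (PySem.List.pyGetD l2r (i - off) ' ') = some (PySem.List.pyGetD l1 i ' ')
      · rw [if_pos hP, if_pos hP]; rfl
      · rw [if_neg hP, if_neg hP]; rfl)]
  rw [show (fun i => if pvP l1 l2r off i then (1 : Int) else 0) =
      (fun i => if decide (pvP l1 l2r off i) = true then (1 : Int) else 0) from
    funext fun i => by simp only [decide_eq_true_eq]]
  rw [PySem.List.sum_map_ite_one_zero]
  simp

theorem pvCounter_keys_aux (ps : PySem.Dict Char (List Int)) (l : List (Int × Char))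
    (d : PySem.Dict Int Int) :
    (l.foldl (fun d p =>
        (ps.getD p.2 []).foldl
          (fun d j => d.insert (p.1 - j) (d.getD (p.1 - j) 0 + 1)) d) d).keys =
      PySem.Set.update d.keys
        (l.flatMap (fun p => (ps.getD p.2 []).map (fun j => p.1 - j))) := by
  induction l generalizing d with
  | nil => simp [PySem.Set.update]
  | cons p l ih =>
    simp only [List.foldl_cons, List.flatMap_cons]
    rw [ih]
    have hkd : ((ps.getD p.2 []).foldl
        (fun d j => d.insert (p.1 - j) (d.getD (p.1 - j) 0 + 1)) d).keys =
        PySem.Set.update d.keys ((ps.getD p.2 []).map (fun j => p.1 - j)) := by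
      rw [show ((ps.getD p.2 []).foldl
          (fun d j => d.insert (p.1 - j) (d.getD (p.1 - j) 0 + 1)) d) =
          (((ps.getD p.2 []).map (fun j => p.1 - j)).foldl
            (fun d k => d.insert k (d.getD k 0 + 1)) d) from (List.foldl_map (f := fun j : Int => p.1 - j) (g := fun (d : PySem.Dict Int Int) k => d.insert k (d.getD k 0 + 1))).symm]
      have := PySem.Dict.keys_foldl_insert_key
        (l := (ps.getD p.2 []).map (fun j => p.1 - j)) (key := fun k : Int => k)
        (f := fun d k => d.getD k 0 + 1) (d := d)
      simpa using this
    rw [hkd]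
    simp [PySem.Set.update, List.foldl_append]

theorem pvCounter_nodup_keys (l1 l2r : List Char) : (pvCounter l1 l2r).keys.Nodup := by
  unfold pvCounter
  generalize (PySem.List.enumerate l1) = l
  have : ∀ (d : PySem.Dict Int Int), d.keys.Nodup →
      (l.foldl (fun d p =>
        ((pvPartners l2r).getD p.2 []).foldl
          (fun d j => d.insert (p.1 - j) (d.getD (p.1 - j) 0 + 1)) d) d).keys.Nodup := by
    induction l with
    | nil => intro d hd; simpa using hd
    | cons p l ih =>
      intro d hd
      simp only [List.foldl_cons]
      apply ih
      rw [show (((pvPartners l2r).getD p.2 []).foldl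
          (fun d j => d.insert (p.1 - j) (d.getD (p.1 - j) 0 + 1)) d) =
          ((((pvPartners l2r).getD p.2 []).map (fun j => p.1 - j)).foldl
            (fun d k => d.insert k (d.getD k 0 + 1)) d) from (List.foldl_map (f := fun j : Int => p.1 - j) (g := fun (d : PySem.Dict Int Int) k => d.insert k (d.getD k 0 + 1))).symm]
      have := PySem.Dict.nodup_keys_foldl_insert_key
        (l := ((pvPartners l2r).getD p.2 []).map (fun j => p.1 - j)) (key := fun k : Int => k)
        (f := fun d k => d.getD k 0 + 1) (d := d) hd
      simpa using this
  exact this _ (by simp [PySem.Dict.nodup_keys_empty])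

theorem pvCounter_mem_keys (l1 l2r : List Char) (off : Int) :
    off ∈ (pvCounter l1 l2r).keys ↔ 0 < pvScoreA l1 l2r off := by
  unfold pvCounter
  rw [pvCounter_keys_aux]
  rw [PySem.Set.mem_update]
  simp only [PySem.Dict.keys_empty, List.not_mem_nil, false_or]
  rw [List.mem_flatMap]
  rw [pvScoreA_eq_countP]
  constructor
  · rintro ⟨p, hp, hoff⟩
    obtain ⟨j, hj, hij⟩ := List.mem_map.mp hoff
    have hjc : 0 < List.count j ((pvPartners l2r).getD p.2 []) := List.count_pos_iff.mpr hj
    rw [pvPartners_count] at hjc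
    by_cases hcond : 0 ≤ j ∧ j < PySem.List.len l2r ∧
        pvComp.get? (PySem.List.pyGetD l2r j ' ') = some p.2
    · -- p comes from enumerate l1, so p = (i, l1[i])
      rw [PySem.List.enumerate_eq_map_pyRange l1 ' '] at hp
      obtain ⟨i, hiL, hpi⟩ := List.mem_map.mp hp
      have h1 : 0 < ((PySem.List.pyRange 0 (PySem.List.len l1) 1).countP
          (fun i => decide (pvP l1 l2r off i))) := by
        apply List.countP_pos_iff.mpr
        refine ⟨i, hiL, ?_⟩
        apply decide_eq_true
        have hps : p.2 = PySem.List.pyGetD l1 i ' ' := by rw [← hpi]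
        have hp1 : p.1 = i := by rw [← hpi]
        rw [hp1] at hij
        have hj' : j = i - off := by omega
        subst hj'
        exact ⟨hcond.1, hcond.2.1, by rw [hcond.2.2, hps]⟩
      exact_mod_cast h1
    · rw [if_neg hcond] at hjc; omega
  · intro h
    have h' : 0 < ((PySem.List.pyRange 0 (PySem.List.len l1) 1).countP
        (fun i => decide (pvP l1 l2r off i))) := by exact_mod_cast h
    obtain ⟨i, hiL, hpd⟩ := List.countP_pos_iff.mp h'
    have hp : pvP l1 l2r off i := of_decide_eq_true hpd
    refine ⟨(i, PySem.List.pyGetD l1 i ' '), ?_, ?_⟩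
    · rw [PySem.List.enumerate_eq_map_pyRange l1 ' ']
      exact List.mem_map.mpr ⟨i, hiL, rfl⟩
    · apply List.mem_map.mpr
      refine ⟨i - off, ?_, by simp⟩
      apply List.count_pos_iff.mp
      rw [pvPartners_count, if_pos ⟨hp.1, hp.2.1, hp.2.2⟩]
      omega

theorem pvFold_fst (s : Int → Int) (L : List Int) (b : Int × Int) :
    (L.foldl (fun b off => if s off > b.1 then (s off, off) else b) b).1 =
      L.foldl (fun a o => max a (s o)) b.1 := by
  induction L generalizing b with
  | nil => rfl
  | cons o L ih =>
    simp only [List.foldl_cons]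
    by_cases h : s o > b.1
    · simp only [h, if_pos]
      rw [ih]
      congr 1
      exact (max_eq_right h.le).symm
    · simp only [h, if_neg, if_false]
      rw [ih]
      congr 1
      exact (max_eq_left (not_lt.mp h)).symm

theorem pvFold_id (s : Int → Int) (L : List Int) (b : Int × Int)
    (h : ∀ o ∈ L, s o ≤ b.1) :
    L.foldl (fun b off => if s off > b.1 then (s off, off) else b) b = b := by
  induction L with
  | nil => rfl
  | cons o L ih =>
    simp only [List.foldl_cons]
    have ho : ¬ s o > b.1 := not_lt.mpr (h o (List.mem_cons_self ..))
    simp only [ho, if_neg, if_false]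
    exact ih (fun o' ho' => h o' (List.mem_cons_of_mem _ ho'))

theorem pvFold_argmax (s : Int → Int) (L : List Int) (hL : L.Pairwise (· < ·)) (b : Int × Int)
    (h : ∃ o ∈ L, b.1 < s o) :
    (L.foldl (fun b off => if s off > b.1 then (s off, off) else b) b).2 ∈ L ∧
    s (L.foldl (fun b off => if s off > b.1 then (s off, off) else b) b).2 =
      (L.foldl (fun b off => if s off > b.1 then (s off, off) else b) b).1 ∧
    ∀ o ∈ L, s o = (L.foldl (fun b off => if s off > b.1 then (s off, off) else b) b).1 →
      (L.foldl (fun b off => if s off > b.1 then (s off, off) else b) b).2 ≤ o := by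
  induction L generalizing b with
  | nil => obtain ⟨o, ho, _⟩ := h; exact absurd ho (List.not_mem_nil)
  | cons o L ih =>
    have hLt := (List.pairwise_cons.mp hL).2
    have hoL := (List.pairwise_cons.mp hL).1
    simp only [List.foldl_cons]
    by_cases ho : s o > b.1
    · simp only [ho, if_pos]
      by_cases hT : ∃ o' ∈ L, (s o, o).1 < s o'
      · obtain ⟨r1, r2, r3⟩ := ih hLt (s o, o) hT
        refine ⟨List.mem_cons_of_mem _ r1, r2, ?_⟩
        intro o0 ho0 hs0
        rcases List.mem_cons.mp ho0 with h1 | h1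
        · -- s o0 = s o < r.1, impossible
          exfalso
          obtain ⟨o', ho', hso'⟩ := hT
          have hfst := pvFold_fst s L (s o, o)
          have hle := (PySem.List.le_foldl_max_int L s (s o, o).1).2 o' ho'
          rw [← hfst] at hle
          subst h1
          omega
        · exact r3 o0 h1 hs0
      · push_neg at hT
        rw [pvFold_id s L (s o, o) (by intro o' ho'; exact hT o' ho')]
        refine ⟨List.mem_cons_self .., rfl, ?_⟩
        intro o0 ho0 _
        rcases List.mem_cons.mp ho0 with h1 | h1
        · omega
        · exact (hoL o0 h1).le
    · simp only [ho, if_neg, if_false]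
      have hT : ∃ o' ∈ L, b.1 < s o' := by
        obtain ⟨o', ho', hso'⟩ := h
        rcases List.mem_cons.mp ho' with h1 | h1
        · exfalso; rw [h1] at hso'; exact ho hso'
        · exact ⟨o', h1, hso'⟩
      obtain ⟨r1, r2, r3⟩ := ih hLt b hT
      refine ⟨List.mem_cons_of_mem _ r1, r2, ?_⟩
      intro o0 ho0 hs0
      rcases List.mem_cons.mp ho0 with h1 | h1
      · exfalso
        obtain ⟨o', ho', hso'⟩ := hT
        have hfst := pvFold_fst s L b
        have hle := (PySem.List.le_foldl_max_int L s b.1).2 o' ho'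
        rw [← hfst] at hle
        subst h1
        omega
      · exact r3 o0 h1 hs0

-- A's fold in pvBestA is exactly the pvFold shape with s = pvScoreA l1 l2r
theorem pvBestA_fst (l1 l2r : List Char) :
    (pvBestA l1 l2r).1 =
      (PySem.List.pyRange (-(PySem.List.len l2r - 1)) (PySem.List.len l1) 1).foldl
        (fun a o => max a (pvScoreA l1 l2r o)) 0 :=
  pvFold_fst (pvScoreA l1 l2r) _ _

theorem pvBestA_eq_fold (l1 l2r : List Char) :
    pvBestA l1 l2r =
      (PySem.List.pyRange (-(PySem.List.len l2r - 1)) (PySem.List.len l1) 1).foldl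
        (fun b off => if pvScoreA l1 l2r off > b.1 then (pvScoreA l1 l2r off, off) else b)
        (0, 0) := rfl

theorem pvZero_iff (l1 l2r : List Char) :
    (pvBestA l1 l2r).1 = 0 ↔ ∀ off, pvScoreA l1 l2r off ≤ 0 := by
  constructor
  · intro h0 off
    by_contra hpos
    push_neg at hpos
    have hmem : off ∈ PySem.List.pyRange (-(PySem.List.len l2r - 1)) (PySem.List.len l1) 1 := by
      have := pvScoreA_support l1 l2r off hpos
      exact PySem.List.mem_pyRange_one.mpr this
    have hle := (PySem.List.le_foldl_max_int
        (PySem.List.pyRange (-(PySem.List.len l2r - 1)) (PySem.List.len l1) 1)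
        (pvScoreA l1 l2r) 0).2 off hmem
    rw [← pvBestA_fst, h0] at hle
    omega
  · intro h
    rw [pvBestA_eq_fold, pvFold_id (pvScoreA l1 l2r) _ _ (fun o _ => h o)]

theorem pvItems_nil_iff (l1 l2r : List Char) :
    (pvCounter l1 l2r).items = [] ↔ ∀ off, pvScoreA l1 l2r off ≤ 0 := by
  have hkeys : (pvCounter l1 l2r).keys = (pvCounter l1 l2r).items.map (·.1) := rfl
  constructor
  · intro h off
    by_contra hpos
    push_neg at hpos
    have := pvCounter_mem_keys l1 l2r off |>.mpr hpos
    rw [hkeys, h] at this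
    exact absurd this (List.not_mem_nil)
  · intro h
    have hk : (pvCounter l1 l2r).keys = [] := by
      apply List.eq_nil_iff_forall_not_mem.mpr
      intro off hoff
      have := (pvCounter_mem_keys l1 l2r off).mp hoff
      have := h off
      omega
    rw [hkeys] at hk
    exact List.map_eq_nil_iff.mp hk

theorem pvSelect (l1 l2r : List Char) (h : (pvCounter l1 l2r).items ≠ []) :
    PySem.List.maxD (pvCounter l1 l2r).values (fun v => v) 0 = (pvBestA l1 l2r).1 ∧
    PySem.List.minD (((pvCounter l1 l2r).items.filter
        (fun p => p.2 == PySem.List.maxD (pvCounter l1 l2r).values (fun v => v) 0)).map (·.1))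
      (fun k => k) 0 = (pvBestA l1 l2r).2 := by
  set cnt := pvCounter l1 l2r with hcnt
  set L := PySem.List.pyRange (-(PySem.List.len l2r - 1)) (PySem.List.len l1) 1 with hLdef
  set M := (pvBestA l1 l2r).1 with hM
  have hnd := pvCounter_nodup_keys l1 l2r
  -- some offset has positive score
  have hex : ∃ off, 0 < pvScoreA l1 l2r off := by
    by_contra hc
    push_neg at hc
    exact h ((pvItems_nil_iff l1 l2r).mpr (fun off => hc off))
  obtain ⟨off0, hoff0⟩ := hex
  have hoff0L : off0 ∈ L := PySem.List.mem_pyRange_one.mpr (pvScoreA_support l1 l2r off0 hoff0)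
  have hMfold : M = L.foldl (fun a o => max a (pvScoreA l1 l2r o)) 0 := pvBestA_fst l1 l2r
  have hMpos : 0 < M := by
    have := (PySem.List.le_foldl_max_int L (pvScoreA l1 l2r) 0).2 off0 hoff0L
    rw [← hMfold] at this
    omega
  -- M is attained on L
  have hattain : ∃ o ∈ L, pvScoreA l1 l2r o = M := by
    have : L.foldl (fun a o => max a (pvScoreA l1 l2r o)) 0 =
        (L.map (pvScoreA l1 l2r)).foldl max 0 := by rw [List.foldl_map]
    rw [this] at hMfold
    rcases PySem.List.foldl_max_mem (L.map (pvScoreA l1 l2r)) 0 with h0 | hmem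
    · rw [← hMfold] at h0; omega
    · rw [← hMfold] at hmem
      obtain ⟨o, hoL, hos⟩ := List.mem_map.mp hmem
      exact ⟨o, hoL, hos⟩
  obtain ⟨ostar, hostarL, hostar⟩ := hattain
  have hostarK : ostar ∈ cnt.keys := (pvCounter_mem_keys l1 l2r ostar).mpr (by omega)
  have hvals : cnt.values = cnt.keys.map (fun k => cnt.getD k 0) :=
    PySem.Dict.values_eq_map_keys cnt hnd 0
  have hMv : M ∈ cnt.values := by
    rw [hvals]
    exact List.mem_map.mpr ⟨ostar, hostarK, by rw [pvCounter_getD]; exact hostar⟩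
  -- max of values
  obtain ⟨v, hv⟩ : ∃ v, PySem.List.max? cnt.values (fun v => v) = some v := by
    rcases hq : PySem.List.max? cnt.values (fun v => v) with _ | v
    · rw [PySem.List.max?_eq_none_iff] at hq
      rw [hq] at hMv
      simp at hMv
    · exact ⟨v, rfl⟩
  have hmaxD : PySem.List.maxD cnt.values (fun v => v) 0 = v := by
    simp [PySem.List.maxD, hv]
  have hvM : v = M := by
    have hvmem : v ∈ cnt.values := PySem.List.max?_mem hv
    have hvle : v ≤ M := by
      rw [hvals] at hvmem
      obtain ⟨k, hk, hkv⟩ := List.mem_map.mp hvmem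
      have hks : cnt.getD k 0 = pvScoreA l1 l2r k := pvCounter_getD l1 l2r k
      have hkpos : 0 < pvScoreA l1 l2r k := (pvCounter_mem_keys l1 l2r k).mp hk
      have hkL : k ∈ L := PySem.List.mem_pyRange_one.mpr (pvScoreA_support l1 l2r k hkpos)
      have := (PySem.List.le_foldl_max_int L (pvScoreA l1 l2r) 0).2 k hkL
      rw [← hMfold] at this
      omega
    have hMle : M ≤ v := PySem.List.max?_isMax hv M hMv
    omega
  -- the argmax offsets list
  have hksmem : ∀ k : Int, k ∈ ((cnt.items.filter (fun p => p.2 == v)).map (·.1)) ↔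
      pvScoreA l1 l2r k = M := by
    intro k
    constructor
    · intro hk
      obtain ⟨p, hpf, hpk⟩ := List.mem_map.mp hk
      have hpi := List.mem_filter.mp hpf
      have hpv : p.2 = v := by have := hpi.2; simpa using this
      have : cnt.getD p.1 0 = p.2 := PySem.Dict.getD_of_mem_items cnt
        (by rw [show (p.1, p.2) = p from rfl]; exact hpi.1) hnd 0
      rw [← hpk, ← pvCounter_getD l1 l2r, this, hpv, hvM]
    · intro hk
      have hkpos : 0 < pvScoreA l1 l2r k := by omega
      have hkK : k ∈ cnt.keys := (pvCounter_mem_keys l1 l2r k).mpr hkpos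
      have hget : cnt.get? k = some M := by
        cases hq : cnt.get? k with
        | none =>
          rw [PySem.Dict.get?_eq_none_iff_not_mem_keys] at hq
          exact absurd hkK hq
        | some w =>
          have hw : cnt.getD k 0 = w := PySem.Dict.getD_of_get?_eq_some _ _ hq
          rw [pvCounter_getD l1 l2r, hk] at hw
          exact congrArg some hw.symm
      have hitem : (k, M) ∈ cnt.items := (PySem.Dict.get?_eq_some_iff_mem_items cnt k M hnd).mp hget
      exact List.mem_map.mpr ⟨(k, M), List.mem_filter.mpr ⟨hitem, by simp [hvM]⟩, rfl⟩
  -- A's argmax characterisation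
  have hL : L.Pairwise (· < ·) := PySem.List.pairwise_lt_pyRange_one _ _
  have hargA := pvFold_argmax (pvScoreA l1 l2r) L hL (0, 0)
    ⟨ostar, hostarL, by rw [hostar]; omega⟩
  rw [← pvBestA_eq_fold] at hargA
  obtain ⟨harg1, harg2, harg3⟩ := hargA
  -- now min over the argmax list
  have hbk : (pvBestA l1 l2r).2 ∈ ((cnt.items.filter (fun p => p.2 == v)).map (·.1)) :=
    (hksmem _).mpr (by rw [harg2, ← hM])
  obtain ⟨m0, hm0⟩ : ∃ m0, PySem.List.min? ((cnt.items.filter (fun p => p.2 == v)).map (·.1))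
      (fun k => k) = some m0 := by
    rcases hq : PySem.List.min? ((cnt.items.filter (fun p => p.2 == v)).map (·.1))
        (fun k => k) with _ | m0
    · rw [PySem.List.min?_eq_none_iff] at hq
      rw [hq] at hbk
      simp at hbk
    · exact ⟨m0, hq⟩
  have hminD : PySem.List.minD ((cnt.items.filter (fun p => p.2 == v)).map (·.1)) (fun k => k) 0
      = m0 := by simp [PySem.List.minD, hm0]
  have hm0mem := PySem.List.min?_mem hm0
  have hm0M : pvScoreA l1 l2r m0 = M := (hksmem m0).mp hm0mem
  have hm0L : m0 ∈ L := PySem.List.mem_pyRange_one.mpr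
    (pvScoreA_support l1 l2r m0 (by omega))
  have h1 : (pvBestA l1 l2r).2 ≤ m0 := harg3 m0 hm0L (by rw [hm0M, ← hM])
  have h2 : m0 ≤ (pvBestA l1 l2r).2 := PySem.List.min?_isMin hm0 _ hbk
  constructor
  · rw [hmaxD, hvM]
  · rw [show (fun p : Int × Int => p.2 == PySem.List.maxD cnt.values (fun v => v) 0)
        = (fun p : Int × Int => p.2 == v) from by rw [hmaxD]]
    rw [hminD]
    omega

-- the middle-line branches of A and B agree pointwise
theorem pvMid_eq (a b c : Prop) [Decidable a] [Decidable b] [Decidable c] (x y z : Char) :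
    (if a ∧ b ∧ c then x else if a ∧ b then y else z) =
      (if a ∧ b then (if c then x else y) else z) := by
  split_ifs <;> tauto

theorem pvRender_aux (l1 l2r : List Char) (bo : Int) :
    ∀ (R : List Int) (acc : List Char × List Char × List Char),
    R.foldl
      (fun acc pos =>
        let j := pos - bo
        let c1 := if 0 ≤ pos ∧ pos < PySem.List.len l1 then PySem.List.pyGetD l1 pos ' ' else ' '
        let c2 := if 0 ≤ j ∧ j < PySem.List.len l2r then PySem.List.pyGetD l2r j ' ' else ' '
        let mc := if c1 ≠ ' ' ∧ c2 ≠ ' ' ∧ pvComp.get? c2 = some c1 then '|'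
                  else if c1 ≠ ' ' ∧ c2 ≠ ' ' then '·' else ' '
        (acc.1 ++ [c1], acc.2.1 ++ [mc], acc.2.2 ++ [c2])) acc =
      (acc.1 ++ R.map (fun pos => (pvCell l1 l2r bo pos).1),
       acc.2.1 ++ R.map (fun pos => (pvCell l1 l2r bo pos).2.1),
       acc.2.2 ++ R.map (fun pos => (pvCell l1 l2r bo pos).2.2))
  | [], acc => by simp
  | pos :: R, acc => by
    simp only [List.foldl_cons, List.map_cons]
    rw [pvRender_aux l1 l2r bo R _]
    simp only [pvCell]
    rw [pvMid_eq]
    simp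

theorem pvRender_eq (l1 l2r : List Char) (bo : Int) :
    pvRenderA l1 l2r bo =
      (((PySem.List.pyRange (min 0 bo)
          (max (PySem.List.len l1) (bo + PySem.List.len l2r)) 1).map
            (fun pos => (pvCell l1 l2r bo pos).1)),
       ((PySem.List.pyRange (min 0 bo)
          (max (PySem.List.len l1) (bo + PySem.List.len l2r)) 1).map
            (fun pos => (pvCell l1 l2r bo pos).2.1)),
       ((PySem.List.pyRange (min 0 bo)
          (max (PySem.List.len l1) (bo + PySem.List.len l2r)) 1).map
            (fun pos => (pvCell l1 l2r bo pos).2.2))) := by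
  unfold pvRenderA
  rw [pvRender_aux]
  simp

-- ===== VERDICT (by name: the statement is the Claim_ definition above) =====
theorem generate_dimer_ascii_spec : Claim_equal_generate_dimer_ascii := by
  intro seq1 seq2 is_homodimer _
  unfold Spec_generate_dimer_ascii
  simp only [generate_dimer_ascii, generate_dimer_ascii_alt]
  set l1 := seq1.toList
  set l2r := pvRC seq2
  by_cases h0 : (pvBestA l1 l2r).1 = 0
  · have hnil : (pvCounter l1 l2r).items = [] :=
      (pvItems_nil_iff l1 l2r).mpr ((pvZero_iff l1 l2r).mp h0)
    rw [if_pos h0, if_pos hnil]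
  · have hnil : (pvCounter l1 l2r).items ≠ [] := by
      intro hc
      exact h0 ((pvZero_iff l1 l2r).mpr ((pvItems_nil_iff l1 l2r).mp hc))
    rw [if_neg h0, if_neg hnil]
    obtain ⟨hsc, hoff⟩ := pvSelect l1 l2r hnil
    rw [hoff]
    rw [pvRender_eq]
    simp only [List.map_map]
    rw [show (if is_homodimer = false then "5'" else "5'") = "5'" from by split_ifs <;> rfl]
    rw [show (if is_homodimer = false then "3'" else "3'") = "3'" from by split_ifs <;> rfl]
    simp [Function.comp_def]
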